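-- pv_equiv track=rewrite | github.com/nandinigithub22/WSN | GSM_INTERLEAVE.py | gsm_interleave
-- ===== SOURCE A (Python) =====
-- def gsm_interleave(input1, input2):
--     # Check if inputs have the same length
--     if len(input1) != len(input2):
--         raise ValueError('Both inputs must have the same length.')
--
--     # Initialize the list to store interleaved elements
--     interleaved = []
--
--     # Interleave the elements
--     for i in range(len(input1)):
--         # Append the element from the first input list
--         interleaved.append(input1[i])
--         # Append the element from the second input list with an offset of 3
--         interleaved.append(input2[(i + 3) % len(input2)])
--
--     return interleaved
-- ===== SOURCE B (Python) =====
-- def gsm_interleave(input1, input2):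
--     if len(input1) != len(input2):
--         raise ValueError('Both inputs must have the same length.')
--
--     # cycle input2 through an amortized two-stack FIFO queue, seeded with the
--     # offset-3 rotation; each step dequeues one element and re-enqueues it
--     k = 3 % len(input2) if input2 else 0
--     front = (input2[k:] + input2[:k])[::-1]  # queue head is at the END: O(1) pop
--     back = []
--     out = []
--     for x in input1:
--         if not front:
--             front = back[::-1]
--             back = []
--         y = front.pop()
--         back.append(y)
--         out.append(x)
--         out.append(y)
--     return out
-- ===== Notes on version B (the rewrite author's own statement) =====
-- stated objective: alternative
-- what changed: B cycles input2 through an amortized two-stack FIFO queue (dequeue and re-enqueue per element), seeded once with the offset-3 rotation, instead of A's index loop with per-element modular indexing into input2.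
import Mathlib
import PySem

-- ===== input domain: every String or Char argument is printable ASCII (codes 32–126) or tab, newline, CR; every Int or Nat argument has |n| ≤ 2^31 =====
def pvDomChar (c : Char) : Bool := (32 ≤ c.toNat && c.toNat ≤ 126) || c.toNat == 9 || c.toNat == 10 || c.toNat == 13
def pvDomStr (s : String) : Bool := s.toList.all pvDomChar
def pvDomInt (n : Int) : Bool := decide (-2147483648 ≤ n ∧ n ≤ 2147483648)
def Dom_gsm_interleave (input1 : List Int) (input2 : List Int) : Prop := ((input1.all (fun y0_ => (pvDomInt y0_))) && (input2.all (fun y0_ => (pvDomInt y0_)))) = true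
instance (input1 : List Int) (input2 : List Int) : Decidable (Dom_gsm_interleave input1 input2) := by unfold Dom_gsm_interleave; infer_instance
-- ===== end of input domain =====

-- B replaces A's index loop (per-element modular indexing) by an amortized two-stack
-- FIFO queue that cycles input2, seeded with the offset-3 rotation (objective: alternative).

-- ===== PORT A =====
-- A: for i in range(len(input1)): append input1[i]; append input2[(i+3) % len(input2)].
-- pyGetD with default 0 transcribes xs[idx]; inside the loop 0 ≤ i < len and the
-- modulus is in range, so the default is never taken.
def gsm_interleave (input1 : List Int) (input2 : List Int) : List Int :=
  if input1.length ≠ input2.length then []   -- A raises ValueError here (outside Pre_)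
  else
    (PySem.List.pyRange 0 (input1.length : Int) 1).foldl
      (fun interleaved i =>
        interleaved ++ [PySem.List.pyGetD input1 i 0,
                        PySem.List.pyGetD input2 (PySem.Int.mod (i + 3) (input2.length : Int)) 0]) []

-- ===== PORT B =====
-- B's loop over input1 with state (front, back, out): if front is empty, transfer
-- back reversed; y = front.pop() (the last element; under Pre_ the queue is nonempty
-- whenever input1 is, so getLast?'s default is never taken); re-enqueue y on back,
-- append x and y to out.  [::-1] is list reversal, ported as .reverse (exact).
def pvAltLoop : List Int → List Int → List Int → List Int → List Int
  | [], _, _, out => out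
  | x :: xs, front, back, out =>
    let fb : List Int × List Int := if front = [] then (back.reverse, []) else (front, back)
    let y : Int := fb.1.getLast?.getD 0
    pvAltLoop xs fb.1.dropLast (fb.2 ++ [y]) (out ++ [x, y])

-- B: k = 3 % len(input2) if input2 else 0; front = (input2[k:] + input2[:k])[::-1]; loop.
def gsm_interleave_alt (input1 : List Int) (input2 : List Int) : List Int :=
  if input1.length ≠ input2.length then []   -- B raises ValueError here (outside Pre_)
  else
    let k : Int := if input2 = [] then 0 else PySem.Int.mod 3 (input2.length : Int)
    pvAltLoop input1
      ((PySem.List.slice input2 (some k) none ++ PySem.List.slice input2 none (some k)).reverse)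
      [] []

-- ===== PRECONDITION & SPEC =====
-- A raises ValueError exactly when the two lists have different lengths; Pre_ excludes only those inputs.
def Pre_gsm_interleave (input1 : List Int) (input2 : List Int) : Prop :=
  input1.length = input2.length
instance (input1 : List Int) (input2 : List Int) : Decidable (Pre_gsm_interleave input1 input2) := by
  unfold Pre_gsm_interleave; infer_instance

def pvWitness_gsm_interleave : List Int × List Int := ([1, 2, 3, 4], [10, 20, 30, 40])

def Spec_gsm_interleave (input1 : List Int) (input2 : List Int) (out : List Int) : Prop := out = gsm_interleave_alt input1 input2
instance (input1 : List Int) (input2 : List Int) (out : List Int) : Decidable (Spec_gsm_interleave input1 input2 out) := by unfold Spec_gsm_interleave; infer_instance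

-- ===== CLAIM (what is proved, stated in full; the proofs are below) =====
def Claim_equal_gsm_interleave : Prop := ∀ (input1 : List Int) (input2 : List Int), Dom_gsm_interleave input1 input2 → Pre_gsm_interleave input1 input2 → Spec_gsm_interleave input1 input2 (gsm_interleave input1 input2)

-- ===== LEMMAS AND PROOFS =====

-- abstract cycling interleave: emit the head of xs and the queue head, then rotate the queue
def cycInterleave : List Int → List Int → List Int
  | [], _ => []
  | x :: xs, q => x :: q.headD 0 :: cycInterleave xs (q.drop 1 ++ q.take 1)

-- reversing a nonempty list exposes its last element at the head
lemma reverse_eq_getLast_cons (l : List Int) (h : l ≠ []) :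
    l.reverse = l.getLast h :: l.dropLast.reverse := by
  conv_lhs => rw [← List.dropLast_append_getLast h]
  simp

-- the two-stack loop computes the cycling interleave of the queue front.reverse ++ back
lemma loop_eq (xs : List Int) : ∀ (front back out : List Int),
    front.reverse ++ back ≠ [] →
    pvAltLoop xs front back out = out ++ cycInterleave xs (front.reverse ++ back) := by
  induction xs with
  | nil => intro front back out _; simp [pvAltLoop, cycInterleave]
  | cons x xs ih =>
    intro front back out hq
    cases front with
    | nil =>
      simp only [List.reverse_nil, List.nil_append] at hq
      obtain ⟨b0, bt, rfl⟩ := List.exists_cons_of_ne_nil hq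
      show pvAltLoop xs ((b0 :: bt).reverse.dropLast)
            ([] ++ [(b0 :: bt).reverse.getLast?.getD 0])
            (out ++ [x, (b0 :: bt).reverse.getLast?.getD 0]) = _
      have hrev : (b0 :: bt).reverse = bt.reverse ++ [b0] := by simp
      have hlast : (b0 :: bt).reverse.getLast?.getD 0 = b0 := by
        rw [hrev]; simp
      have hdrop : (b0 :: bt).reverse.dropLast = bt.reverse := by
        rw [hrev, List.dropLast_concat]
      rw [hlast, hdrop, List.nil_append, ih bt.reverse [b0] _ (by simp)]
      simp [cycInterleave, List.append_assoc]
    | cons f0 fr =>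
      have hf : (f0 :: fr) ≠ [] := by simp
      show pvAltLoop xs ((f0 :: fr).dropLast)
            (back ++ [(f0 :: fr).getLast?.getD 0])
            (out ++ [x, (f0 :: fr).getLast?.getD 0]) = _
      have hlast : (f0 :: fr).getLast?.getD 0 = (f0 :: fr).getLast hf := by
        rw [List.getLast?_eq_some_getLast hf]; rfl
      have hrev := reverse_eq_getLast_cons (f0 :: fr) hf
      rw [hlast, ih _ _ _ (by simp)]
      rw [List.append_assoc]
      congr 1
      show [x, _] ++ _ = cycInterleave (x :: xs) _
      rw [show cycInterleave (x :: xs) ((f0 :: fr).reverse ++ back) =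
            x :: ((f0 :: fr).reverse ++ back).headD 0 ::
              cycInterleave xs (((f0 :: fr).reverse ++ back).drop 1 ++
                                ((f0 :: fr).reverse ++ back).take 1) from rfl]
      rw [hrev]
      simp [List.append_assoc]

-- rotating by m % n agrees index-by-index with modular lookup at offset m
lemma rot_getElem? (xs : List Int) (m k : Nat) (hk : k < xs.length) :
    (xs.drop (m % xs.length) ++ xs.take (m % xs.length))[k]? = xs[(k + m) % xs.length]? := by
  have hn : 0 < xs.length := by omega
  set n := xs.length with hnn
  set p := m % n with hp
  have hplt : p < n := Nat.mod_lt _ hn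
  have hmod : (k + m) % n = (k + p) % n := by
    conv_lhs => rw [Nat.add_mod]
    rw [Nat.mod_eq_of_lt hk, ← hp]
  rw [hmod]
  by_cases hcase : k + p < n
  · rw [List.getElem?_append_left (by simp [List.length_drop]; omega),
        List.getElem?_drop, Nat.mod_eq_of_lt hcase, Nat.add_comm]
  · rw [List.getElem?_append_right (by simp [List.length_drop]; omega)]
    have : (k + p) % n = k + p - n := by
      rw [Nat.mod_eq_sub_mod (by omega), Nat.mod_eq_of_lt (by omega)]
    rw [this]
    simp only [List.length_drop]
    rw [List.getElem?_take_of_lt (by omega)]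
    congr 1; omega

-- getD version of the rotation lemma, at a reduced index
lemma rot_getD (ys : List Int) (m k : Nat) (hn : 0 < ys.length) :
    (ys.drop (m % ys.length) ++ ys.take (m % ys.length)).getD (k % ys.length) 0 =
      ys.getD ((k + m) % ys.length) 0 := by
  have h1 := rot_getElem? ys m (k % ys.length) (Nat.mod_lt _ hn)
  have h2 : (k % ys.length + m) % ys.length = (k + m) % ys.length := by
    conv_lhs => rw [Nat.add_mod, Nat.mod_mod_of_dvd _ dvd_rfl]
    rw [← Nat.add_mod]
  rw [List.getD_eq_getElem?_getD, List.getD_eq_getElem?_getD, h1, h2]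

-- one cycling step = modular lookup shifted by one
lemma rot1_getD (ys : List Int) (k : Nat) (hn : 0 < ys.length) :
    (ys.drop 1 ++ ys.take 1).getD (k % ys.length) 0 = ys.getD ((k + 1) % ys.length) 0 := by
  by_cases h1 : ys.length = 1
  · obtain ⟨y, hy⟩ := List.length_eq_one_iff.mp h1
    subst hy
    simp
  · have e : (1 : Nat) % ys.length = 1 := Nat.mod_eq_of_lt (by omega)
    have := rot_getD ys 1 k hn
    rwa [e] at this

-- the cycling interleave in flatMap-over-range form
lemma cyc_eq (xs ys : List Int) (h : ys ≠ []) :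
    cycInterleave xs ys =
      (List.range xs.length).flatMap
        (fun k => [xs.getD k 0, ys.getD (k % ys.length) 0]) := by
  induction xs generalizing ys with
  | nil => simp [cycInterleave]
  | cons x xs ih =>
    have hn : 0 < ys.length := List.length_pos_iff.mpr h
    have hlen : (ys.drop 1 ++ ys.take 1).length = ys.length := by
      simp [List.length_take]; omega
    have h' : ys.drop 1 ++ ys.take 1 ≠ [] := by
      intro hc; rw [hc] at hlen; simp at hlen; omega
    show x :: ys.headD 0 :: cycInterleave xs (ys.drop 1 ++ ys.take 1) = _
    rw [ih _ h', List.length_cons, List.range_succ_eq_map, List.flatMap_cons,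
        List.flatMap_map]
    have e0 : ys.headD 0 = ys.getD (0 % ys.length) 0 := by
      rw [Nat.zero_mod]
      cases ys with
      | nil => simp
      | cons a t => simp
    rw [e0]
    simp only [List.getD_cons_zero, List.cons_append, List.nil_append]
    congr 2
    rw [List.flatMap_def, List.flatMap_def]
    apply congrArg List.flatten
    apply List.map_congr_left
    intro k hk
    simp only [List.getD_cons_succ]
    rw [hlen, rot1_getD ys k hn]

-- A's foldl loop in flatMap-over-range form
lemma A_eq (input1 input2 : List Int) (h : input1.length = input2.length) :
    gsm_interleave input1 input2 =
      (List.range input1.length).flatMap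
        (fun k => [input1.getD k 0, input2.getD ((k + 3) % input2.length) 0]) := by
  unfold gsm_interleave
  rw [if_neg (by simp [h]), PySem.List.foldl_append_eq_flatMap, List.nil_append,
      PySem.List.pyRange_one]
  have hnn : (((input1.length : Int)) - 0).toNat = input1.length := by simp
  rw [hnn, List.flatMap_def, List.flatMap_def]
  simp only [List.map_map]
  apply congrArg List.flatten
  apply List.map_congr_left
  intro k hk
  simp only [Function.comp_apply]
  have e1 : PySem.List.pyGetD input1 ((0 : Int) + (k : Int)) 0 = input1.getD k 0 := by
    rw [zero_add, PySem.List.pyGetD_natCast]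
  have e2 : PySem.Int.mod ((0 : Int) + (k : Int) + 3) (input2.length : Int) =
      (((k + 3) % input2.length : Nat) : Int) := by
    rw [zero_add, show ((k : Int) + 3) = (((k + 3 : Nat)) : Int) from by push_cast; ring,
        PySem.Int.mod_natCast]
  rw [e1, e2, PySem.List.pyGetD_natCast]

theorem equal_aux (input1 input2 : List Int) (h : input1.length = input2.length) :
    gsm_interleave input1 input2 = gsm_interleave_alt input1 input2 := by
  by_cases h2 : input2 = []
  · subst h2
    have h1 : input1 = [] := List.length_eq_zero_iff.mp (by simpa using h)
    subst h1
    decide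
  · have hn : 0 < input2.length := List.length_pos_iff.mpr h2
    rw [A_eq input1 input2 h]
    unfold gsm_interleave_alt
    rw [if_neg (by simp [h])]
    have hk3 : PySem.Int.mod 3 (input2.length : Int) = (((3 % input2.length : Nat)) : Int) := by
      have := PySem.Int.mod_natCast 3 input2.length
      norm_num at this ⊢; exact this
    show _ = pvAltLoop input1
      ((PySem.List.slice input2
          (some (if input2 = [] then 0 else PySem.Int.mod 3 (input2.length : Int))) none ++
        PySem.List.slice input2 none
          (some (if input2 = [] then 0 else PySem.Int.mod 3 (input2.length : Int)))).reverse)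
      [] []
    simp only [if_neg h2, hk3]
    rw [PySem.List.slice_from_natCast, PySem.List.slice_to_natCast]
    set rot := input2.drop (3 % input2.length) ++ input2.take (3 % input2.length) with hrotdef
    have hrlen : rot.length = input2.length := by
      simp [hrotdef, List.length_take]; omega
    have hrot : rot ≠ [] := by
      intro hc; rw [hc] at hrlen; simp at hrlen; omega
    have hrr : rot.reverse.reverse ++ ([] : List Int) = rot := by simp
    rw [loop_eq input1 rot.reverse [] [] (by rw [hrr]; exact hrot), hrr, List.nil_append,
        cyc_eq input1 rot hrot]
    rw [List.flatMap_def, List.flatMap_def]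
    apply congrArg List.flatten
    apply List.map_congr_left
    intro k hk
    rw [hrlen, hrotdef, rot_getD input2 3 k hn]

-- ===== VERDICT (by name: the statement is the Claim_ definition above) =====
theorem gsm_interleave_spec : Claim_equal_gsm_interleave := by
  intro input1 input2 _ hpre
  exact equal_aux input1 input2 hpre
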